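-- pv_equiv track=rewrite | github.com/kostaskaragiorgos/MPS-PARSER | mps_to_array/rhs.py | getRHS
-- ===== SOURCE A (Python) =====
-- def getRHS(list):
--     """ Adds the "rhses"  to a list
--     Args:
--         A list.
--     Returns:
--         A list with t
--     """
--     rhs= False
--     RHS = []
--     for i in list:
--         if (str(i[0:3]).upper() == "RHS"):
--             rhs = True
--             continue
--         if (str(i[0:3]).upper() == any(["ENDATA","RANGES","BOUNDS"])):
--             break
--         if rhs:
--             RHS.append(i)
--     return RHS
-- ===== SOURCE B (Python) =====
-- def getRHS(list):
--     try:
--         idx = next(k for k, x in enumerate(list) if str(x[0:3]).upper() == "RHS")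
--     except StopIteration:
--         return []
--     return [x for x in list[idx + 1:] if str(x[0:3]).upper() != "RHS"]
-- ===== Notes on version B (the rewrite author's own statement) =====
-- stated objective: simpler
-- what changed: Replaces the flag-driven accumulator loop (with its dead break branch) by a two-phase locate-the-first-RHS-marker then filter-the-tail comprehension.
import Mathlib
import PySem

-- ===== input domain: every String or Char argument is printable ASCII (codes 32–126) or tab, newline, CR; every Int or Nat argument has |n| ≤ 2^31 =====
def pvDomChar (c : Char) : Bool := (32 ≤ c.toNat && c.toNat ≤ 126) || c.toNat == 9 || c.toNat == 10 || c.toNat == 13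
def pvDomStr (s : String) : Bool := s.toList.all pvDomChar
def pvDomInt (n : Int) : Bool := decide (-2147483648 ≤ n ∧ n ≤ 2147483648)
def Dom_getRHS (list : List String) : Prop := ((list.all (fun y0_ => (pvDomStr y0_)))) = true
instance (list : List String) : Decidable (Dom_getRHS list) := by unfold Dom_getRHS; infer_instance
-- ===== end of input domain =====

-- B simplifies A's flag-driven scan into locate-first-"RHS"-marker then filter the tail; return values proved equal.


-- ===== PORT A =====
-- str(i[0:3]).upper() == "RHS" — shared by both Pythons
def pvIsRHS (s : String) : Bool := PySem.Str.upper (PySem.Str.slice s (some 0) (some 3)) == "RHS"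

-- A's loop: state (rhs flag, accumulator); the break branch compares a str to any([...]) = True, so it never fires
def getRHS_loop (rhs : Bool) (acc : List String) : List String → List String
  | [] => acc
  | i :: rest =>
    if pvIsRHS i then getRHS_loop true acc rest
    else if false then acc   -- str(i[0:3]).upper() == any([...]) : a str never equals bool True
    else if rhs then getRHS_loop rhs (acc ++ [i]) rest
    else getRHS_loop rhs acc rest

def getRHS (list : List String) : List String := getRHS_loop false [] list

-- ===== PORT B =====
def getRHS_alt (list : List String) : List String :=
  match list.findIdx? pvIsRHS with
  | none => []
  | some idx => (PySem.List.slice list (some ((idx : Int) + 1)) none).filter (fun x => !pvIsRHS x)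

-- ===== PRECONDITION & SPEC =====
def Spec_getRHS (list : List String) (out : List String) : Prop := out = getRHS_alt list
instance (list : List String) (out : List String) : Decidable (Spec_getRHS list out) := by unfold Spec_getRHS; infer_instance

-- ===== CLAIM (what is proved, stated in full; the proofs are below) =====
def Claim_equal_getRHS : Prop := ∀ (list : List String), Dom_getRHS list → Spec_getRHS list (getRHS list)

-- ===== LEMMAS AND PROOFS =====

-- ===== VERDICT (by name: the statement is the Claim_ definition above) =====
theorem loop_true (l : List String) (acc : List String) :
    getRHS_loop true acc l = acc ++ l.filter (fun i => !pvIsRHS i) := by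
  induction l generalizing acc with
  | nil => simp [getRHS_loop]
  | cons i rest ih =>
    by_cases h : pvIsRHS i = true <;> simp [getRHS_loop, h, ih]

theorem loop_false (l : List String) (acc : List String) :
    getRHS_loop false acc l = acc ++ getRHS_alt l := by
  induction l generalizing acc with
  | nil => simp [getRHS_loop, getRHS_alt]
  | cons i rest ih =>
    by_cases h : pvIsRHS i = true
    · simp [getRHS_loop, h, getRHS_alt, List.findIdx?_cons, loop_true,
        PySem.List.slice_from_one]
    · rw [show getRHS_loop false acc (i :: rest) = getRHS_loop false acc rest from by
        simp [getRHS_loop, h], ih]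
      suffices hs : getRHS_alt rest = getRHS_alt (i :: rest) by rw [hs]
      unfold getRHS_alt
      simp only [List.findIdx?_cons, h, Bool.false_eq_true, if_false]
      cases hf : rest.findIdx? pvIsRHS with
      | none => simp
      | some idx =>
        simp only [Option.map_some]
        have h1 : (((idx + 1 : Nat) : Int) + 1) = (((idx + 2 : Nat) : Int)) := by push_cast; ring
        have h2 : (((idx : Int)) + 1) = (((idx + 1 : Nat) : Int)) := by push_cast; ring
        rw [h1, h2, PySem.List.slice_from_natCast, PySem.List.slice_from_natCast]
        simp [List.drop_succ_cons]

theorem getRHS_spec : Claim_equal_getRHS := by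
  intro l _
  unfold Spec_getRHS getRHS
  rw [loop_false]
  simp
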